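-- pv_equiv track=rewrite | github.com/KunalSuman/OS_Simulator | Simulator-Assembler/assembler and simulator/SimpleAssembler/Assembler.py | jtype
-- ===== SOURCE A (Python) =====
-- def jtype(r1,lis,list1,d,pc):
--     opcode ="1101111"
--
--
--     last_element = list1[-1]
--
--     try:
--         # Try converting the last element to an integer
--         labeladdr = int(last_element)
--         if labeladdr<-524288 or labeladdr> 524287:
--             return str("ERROR: immediate out of bounds")
--         pc_offset = labeladdr
--     except ValueError:
--         # Conversion failed, so it's not an integer
--         labeladdr=d[list1[-1]]
--
--         pc_offset = (pc-labeladdr)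
--
--     if(pc_offset>=0):
--         a = bin(pc_offset)
--         n=21
--         b = a[2:]
--
--         c=n-len(b)
--         immediate=""
--
--         for i in range(0,c):
--             immediate=immediate+"0"
--         immediate=immediate+b
--     else:
--        # Make the offset positive for processing
--         pc_offset = abs(pc_offset)
--
--         # Convert the positive offset to binary
--         a = bin(pc_offset)
--         n=21
--         b = a[2:]
--
--         c=n-len(b)
--         immediate=""
--
--         for i in range(0,c):
--             immediate=immediate+"0"
--         immediate=immediate+b
--
--         # Invert the bits
--         inverted_str = ''.join('1' if bit == '0' else '0' for bit in immediate)
--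
--         # Add 1 to the inverted binary
--         carry = 1
--         immediate = ""
--         for bit in inverted_str[::-1]:
--             new_bit = str((int(bit) + carry) % 2)
--             carry = int(bit) and carry
--             immediate = new_bit + immediate
--
--
--         immediate = ''.join(immediate)
--
--     out=immediate[0]+immediate[10:20]+immediate[9]+immediate[1:9]+r1+opcode
--
--     return out
-- ===== SOURCE B (Python) =====
-- def jtype(r1, lis, list1, d, pc):
--     last = list1[-1]
--     try:
--         off = int(last)
--         if off < -524288 or off > 524287:
--             return "ERROR: immediate out of bounds"
--     except ValueError:
--         off = pc - d[last]
--     width = max(21, (-off if off < 0 else off).bit_length())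
--     imm = bin(off % (1 << width))[2:].zfill(width)
--     return imm[0] + imm[10:20] + imm[9] + imm[1:9] + r1 + "1101111"
-- ===== Notes on version B (the rewrite author's own statement) =====
-- stated objective: simpler
-- what changed: A's positive/negative branch (pad loop, bit-inversion comprehension and carry-propagation loop) is replaced by one closed-form two's-complement: off % (1 << width) formatted with zfill, width = max(21, bit_length).
import Mathlib
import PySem

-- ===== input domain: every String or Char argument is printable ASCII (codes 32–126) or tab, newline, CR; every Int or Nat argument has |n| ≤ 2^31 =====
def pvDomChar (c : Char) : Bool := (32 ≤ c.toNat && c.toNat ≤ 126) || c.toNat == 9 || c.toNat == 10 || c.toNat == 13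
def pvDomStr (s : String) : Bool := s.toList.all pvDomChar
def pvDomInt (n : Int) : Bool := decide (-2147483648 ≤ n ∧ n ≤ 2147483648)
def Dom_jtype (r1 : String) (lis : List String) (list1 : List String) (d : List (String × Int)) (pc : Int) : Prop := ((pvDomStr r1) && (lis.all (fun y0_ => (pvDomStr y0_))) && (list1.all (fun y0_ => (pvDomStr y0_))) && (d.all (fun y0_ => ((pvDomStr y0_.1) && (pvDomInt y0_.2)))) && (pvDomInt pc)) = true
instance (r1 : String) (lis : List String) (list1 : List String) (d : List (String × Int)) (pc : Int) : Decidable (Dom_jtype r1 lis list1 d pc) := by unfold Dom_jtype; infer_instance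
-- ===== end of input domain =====

-- B replaces A's pad-loop, bit-inversion comprehension and carry-propagation loop by one closed-form
-- two's-complement (off % (1 << width), zero-filled); objective: simpler.

-- ===== PORT A =====
-- A's pad-to-21 block (bin, strip '0b', pad with the range loop); this code appears verbatim in both
-- branches of A.  Binary-digit strings are kept as List Char (exact; Python only concatenates and
-- slices them); a[2:] is List.drop 2 (exact: Python slices clamp exactly like drop).
def jtypePadA (pcOffset : Int) : List Char :=
  let a := PySem.Int.toBinChars0b pcOffset          -- a = bin(pc_offset)
  let b := a.drop 2                                 -- b = a[2:]
  let c : Int := 21 - (b.length : Int)              -- c = n - len(b), n = 21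
  let immediate := (PySem.List.pyRange 0 c 1).foldl (fun immediate _ => immediate ++ ['0']) ([] : List Char)
  immediate ++ b                                    -- immediate = immediate + b

-- the value of A's 'immediate' variable after the positive/negative branch
def jtypeImmA (pcOffset : Int) : List Char :=
  if pcOffset ≥ 0 then
    jtypePadA pcOffset
  else
    let pcOffset := |pcOffset|                      -- pc_offset = abs(pc_offset)
    let immediate := jtypePadA pcOffset
    -- inverted_str = ''.join('1' if bit == '0' else '0' for bit in immediate)
    let invertedStr := immediate.map (fun bit => if bit = '0' then '1' else '0')
    -- carry loop over inverted_str[::-1], prepending each new bit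
    -- (int(bit) is '(if bit = '1' then 1 else 0)': every char here is '0' or '1')
    let r := invertedStr.reverse.foldl
      (fun (st : Int × List Char) bit =>
        let newBit := PySem.Int.mod ((if bit = '1' then (1 : Int) else 0) + st.1) 2
        ((if bit = '1' then st.1 else 0),            -- carry = int(bit) and carry
         (if newBit = 1 then '1' else '0') :: st.2)) -- immediate = new_bit + immediate
      ((1 : Int), ([] : List Char))
    r.2

-- out = immediate[0]+immediate[10:20]+immediate[9]+immediate[1:9]+r1+opcode; the two single indices
-- are written as the one-char slices immediate[0:1] / immediate[9:10] — exact here, since immediate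
-- always has ≥ 21 chars (both branches pad to width ≥ 21), so IndexError is unreachable.
def jtypeBodyA (r1 opcode : String) (pcOffset : Int) : String :=
  let immediate := jtypeImmA pcOffset
  String.ofList (PySem.List.slice immediate (some 0) (some 1) ++ PySem.List.slice immediate (some 10) (some 20)
    ++ PySem.List.slice immediate (some 9) (some 10) ++ PySem.List.slice immediate (some 1) (some 9)
    ++ r1.toList ++ opcode.toList)

def jtype (r1 : String) (lis : List String) (list1 : List String) (d : List (String × Int)) (pc : Int) : String :=
  let opcode := "1101111"
  match PySem.List.pyGet? list1 (-1) with
  | none => ""                                      -- list1[-1] raises IndexError: excluded by Pre_jtype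
  | some lastElement =>
    match PySem.Int.ofStr? lastElement with         -- try: int(last_element)  except ValueError
    | some labeladdr =>
        if labeladdr < -524288 ∨ labeladdr > 524287 then "ERROR: immediate out of bounds"
        else jtypeBodyA r1 opcode labeladdr
    | none =>
        match (PySem.Dict.mk d).get? lastElement with
        | none => ""                                -- d[list1[-1]] raises KeyError: excluded by Pre_jtype
        | some labeladdr => jtypeBodyA r1 opcode (pc - labeladdr)

-- ===== PORT B =====
-- imm = bin(off % (1 << width))[2:].zfill(width), width = max(21, (-off if off < 0 else off).bit_length())
def jtypeImmB (off : Int) : List Char :=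
  let width : Nat := max 21 (PySem.Int.bitLength (if off < 0 then -off else off))
  PySem.Chars.zfill ((PySem.Int.toBinChars0b (PySem.Int.mod off ((2 : Int) ^ width))).drop 2) (width : Int)

-- return imm[0] + imm[10:20] + imm[9] + imm[1:9] + r1 + "1101111"; the single indices as one-char
-- slices, exact since imm always has width ≥ 21 chars.
def jtypeOutB (r1 : String) (imm : List Char) : String :=
  String.ofList (PySem.List.slice imm (some 0) (some 1) ++ PySem.List.slice imm (some 10) (some 20)
    ++ PySem.List.slice imm (some 9) (some 10) ++ PySem.List.slice imm (some 1) (some 9)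
    ++ r1.toList ++ "1101111".toList)

def jtype_alt (r1 : String) (lis : List String) (list1 : List String) (d : List (String × Int)) (pc : Int) : String :=
  match PySem.List.pyGet? list1 (-1) with
  | none => ""                                      -- list1[-1] raises IndexError: excluded by Pre_jtype
  | some last =>
    match PySem.Int.ofStr? last with                -- try: int(last)  except ValueError
    | some off =>
        if off < -524288 ∨ off > 524287 then "ERROR: immediate out of bounds"
        else jtypeOutB r1 (jtypeImmB off)
    | none =>
        match (PySem.Dict.mk d).get? last with
        | none => ""                                -- d[last] raises KeyError: excluded by Pre_jtype
        | some v => jtypeOutB r1 (jtypeImmB (pc - v))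

-- ===== PRECONDITION & SPEC =====
-- Pre_ excludes exactly the inputs where A raises: an empty list1 (IndexError on list1[-1]) and a
-- last element that is neither an int literal nor a key of d (KeyError on d[list1[-1]]).
def Pre_jtype (r1 : String) (lis : List String) (list1 : List String) (d : List (String × Int)) (pc : Int) : Prop :=
  ((PySem.List.pyGet? list1 (-1)).any
    (fun last => (PySem.Int.ofStr? last).isSome || ((PySem.Dict.mk d).get? last).isSome)) = true
instance (r1 : String) (lis : List String) (list1 : List String) (d : List (String × Int)) (pc : Int) : Decidable (Pre_jtype r1 lis list1 d pc) := by unfold Pre_jtype; infer_instance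

def pvWitness_jtype : String × List String × List String × (List (String × Int)) × Int :=
  ("00000", [], ["lbl"], [("lbl", 4)], 8)

def Spec_jtype (r1 : String) (lis : List String) (list1 : List String) (d : List (String × Int)) (pc : Int) (out : String) : Prop := out = jtype_alt r1 lis list1 d pc
instance (r1 : String) (lis : List String) (list1 : List String) (d : List (String × Int)) (pc : Int) (out : String) : Decidable (Spec_jtype r1 lis list1 d pc out) := by unfold Spec_jtype; infer_instance

-- ===== CLAIM (what is proved, stated in full; the proofs are below) =====
def Claim_equal_jtype : Prop := ∀ (r1 : String) (lis : List String) (list1 : List String) (d : List (String × Int)) (pc : Int), Dom_jtype r1 lis list1 d pc → Pre_jtype r1 lis list1 d pc → Spec_jtype r1 lis list1 d pc (jtype r1 lis list1 d pc)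

-- ===== LEMMAS AND PROOFS =====

-- Binary-string machinery used only by the proofs: pvValL is the value of a string of '0'/'1'
-- chars read LEAST-significant-first; MSB-first strings s are measured by pvValL s.reverse.
def pvBitN (c : Char) : Nat := if c = '1' then 1 else 0
def pvValL : List Char → Nat
  | [] => 0
  | c :: r => pvBitN c + 2 * pvValL r
def pvIsBin (l : List Char) : Prop := ∀ c ∈ l, c = '0' ∨ c = '1'
-- LSB-first binary digits of n (empty for 0); (pvBitsL n).reverse is bin(n)[2:] for n > 0
def pvBitsL : Nat → List Char
  | 0 => []
  | (n + 1) => (if (n + 1) % 2 = 1 then '1' else '0') :: pvBitsL ((n + 1) / 2)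
decreasing_by exact Nat.div_lt_self (Nat.succ_pos n) (by norm_num)

theorem pv_valL_append (a b : List Char) : pvValL (a ++ b) = pvValL a + 2 ^ a.length * pvValL b := by
  induction a with
  | nil => simp [pvValL]
  | cons c r ih => simp [pvValL, ih, List.length_cons, pow_succ]; ring

theorem pv_valL_lt (l : List Char) (h : pvIsBin l) : pvValL l < 2 ^ l.length := by
  induction l with
  | nil => simp [pvValL]
  | cons c r ih =>
    have hc := h c (by simp)
    have hr : pvIsBin r := fun x hx => h x (by simp [hx])
    have := ih hr
    rcases hc with hc | hc <;> simp [pvValL, pvBitN, hc, List.length_cons, pow_succ] <;> omega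

theorem pv_valL_zeros (k : Nat) : pvValL (List.replicate k '0') = 0 := by
  induction k with
  | zero => simp [pvValL]
  | succ k ih => simp [List.replicate_succ, pvValL, pvBitN, ih]

theorem pv_valL_inj (l : List Char) : ∀ (l' : List Char), pvIsBin l → pvIsBin l' →
    l.length = l'.length → pvValL l = pvValL l' → l = l' := by
  induction l with
  | nil => intro l' _ _ hlen _; simpa using (List.length_eq_zero_iff.mp hlen.symm).symm
  | cons c r ih =>
    intro l' h h' hlen hval
    cases l' with
    | nil => simp at hlen
    | cons c' r' =>
      have hc := h c (by simp)
      have hc' := h' c' (by simp)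
      have hr : pvIsBin r := fun x hx => h x (by simp [hx])
      have hr' : pvIsBin r' := fun x hx => h' x (by simp [hx])
      simp [pvValL] at hval
      have hbits : pvBitN c = pvBitN c' ∧ pvValL r = pvValL r' := by
        rcases hc with hc | hc <;> rcases hc' with hc' | hc' <;>
          simp [pvBitN, hc, hc'] at hval ⊢ <;> omega
      have hcc : c = c' := by
        rcases hc with hc | hc <;> rcases hc' with hc' | hc' <;>
          simp [pvBitN, hc, hc'] at hbits ⊢
      simp at hlen
      rw [hcc, ih r' hr hr' hlen hbits.2]

theorem pv_valL_flip (l : List Char) (h : pvIsBin l) :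
    pvValL l + pvValL (l.map (fun bit => if bit = '0' then '1' else '0')) + 1 = 2 ^ l.length := by
  induction l with
  | nil => simp [pvValL]
  | cons c r ih =>
    have hc := h c (by simp)
    have hr : pvIsBin r := fun x hx => h x (by simp [hx])
    have := ih hr
    rcases hc with hc | hc <;>
      simp [pvValL, pvBitN, hc, List.length_cons, pow_succ] <;> omega

theorem pv_isBin_pvBitsL (n : Nat) : pvIsBin (pvBitsL n) := by
  induction n using Nat.strong_induction_on with
  | _ n ih =>
    match n with
    | 0 => intro c hc; simp [pvBitsL] at hc
    | (m + 1) =>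
      intro c hc
      rw [pvBitsL] at hc
      rcases List.mem_cons.mp hc with h | h
      · subst h; split <;> simp
      · exact ih ((m + 1) / 2) (Nat.div_lt_self (Nat.succ_pos m) (by norm_num)) c h

theorem pv_valL_pvBitsL (n : Nat) : pvValL (pvBitsL n) = n := by
  induction n using Nat.strong_induction_on with
  | _ n ih =>
    match n with
    | 0 => simp [pvBitsL, pvValL]
    | (m + 1) =>
      rw [pvBitsL]
      have := ih ((m + 1) / 2) (Nat.div_lt_self (Nat.succ_pos m) (by norm_num))
      have h2 := Nat.mod_two_eq_zero_or_one (m + 1)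
      rcases h2 with h2 | h2 <;> simp [pvValL, pvBitN, h2, this] <;> omega

theorem pv_length_pvBitsL (n : Nat) : (pvBitsL n).length = PySem.Int.bitLength (n : Int) := by
  induction n using Nat.strong_induction_on with
  | _ n ih =>
    match n with
    | 0 => simp [pvBitsL, PySem.Int.bitLength_zero]
    | (m + 1) =>
      rw [pvBitsL, @PySem.Int.bitLength_natCast (m + 1) (Nat.succ_pos m)]
      simp [ih ((m + 1) / 2) (Nat.div_lt_self (Nat.succ_pos m) (by norm_num))]

-- Nat.toDigits 2 (what bin()/format(·,'b') produce behind PySem.Int.toBinChars0b) in pvBitsL terms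
theorem pv_toDigitsCore_eq (f : Nat) : ∀ (n : Nat) (acc : List Char), n < f →
    Nat.toDigitsCore 2 f n acc = (if n = 0 then ['0'] else (pvBitsL n).reverse) ++ acc := by
  induction f with
  | zero => intro n acc h; omega
  | succ f ih =>
    intro n acc h
    rw [Nat.toDigitsCore]
    by_cases h0 : n / 2 = 0
    · have : n = 0 ∨ n = 1 := by omega
      rcases this with rfl | rfl <;> simp [h0, pvBitsL, Nat.digitChar]
    · have hn1 : n ≠ 0 := by omega
      simp only [h0, if_false]
      rw [ih (n / 2) _ (by omega)]
      have h2 := Nat.mod_two_eq_zero_or_one n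
      have hstep : pvBitsL n = (if n % 2 = 1 then '1' else '0') :: pvBitsL (n / 2) := by
        match n, hn1 with
        | (m+1), _ => rw [pvBitsL]
      rw [hstep]
      rcases h2 with h2 | h2 <;> simp [h2, Nat.digitChar, hn1] <;> exact fun h1 => absurd h1 (by omega)

theorem pv_toDigits_eq (n : Nat) : Nat.toDigits 2 n = if n = 0 then ['0'] else (pvBitsL n).reverse := by
  rw [Nat.toDigits, pv_toDigitsCore_eq (n+1) n [] (by omega)]
  simp

theorem pv_td_isBin (u : Nat) : pvIsBin (Nat.toDigits 2 u) := by
  rw [pv_toDigits_eq]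
  split
  · intro c hc; simp at hc; simp [hc]
  · intro c hc; exact pv_isBin_pvBitsL u c (List.mem_reverse.mp hc)

theorem pv_td_val (u : Nat) : pvValL ((Nat.toDigits 2 u).reverse) = u := by
  rw [pv_toDigits_eq]
  split
  · subst ‹u = 0›; simp [pvValL, pvBitN]
  · rw [List.reverse_reverse]; exact pv_valL_pvBitsL u

theorem pv_td_len (u : Nat) : (Nat.toDigits 2 u).length = if u = 0 then 1 else PySem.Int.bitLength (u : Int) := by
  rw [pv_toDigits_eq]
  split <;> simp [pv_length_pvBitsL]

theorem pv_bl_le (u w : Nat) (h : u < 2 ^ w) : PySem.Int.bitLength (u : Int) ≤ w := by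
  rcases Nat.eq_zero_or_pos u with rfl | hpos
  · simp [PySem.Int.bitLength_zero]
  · by_contra hgt
    have hne : ((u : Int)) ≠ 0 := Int.natCast_ne_zero.mpr hpos.ne'
    have h1 := PySem.Int.two_pow_bitLength_le (u : Int) hne
    have h2 : ((u : Int)).natAbs = u := by omega
    rw [h2] at h1
    have h3 : 2 ^ w ≤ 2 ^ (PySem.Int.bitLength (u : Int) - 1) :=
      Nat.pow_le_pow_right (by norm_num) (by omega)
    omega

-- A's carry-propagation loop computes (value + carry) mod 2^length, bit by bit
theorem pv_carry (r : List Char) : ∀ (acc : List Char) (c : Int), pvIsBin r → (c = 0 ∨ c = 1) →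
    ∃ (m : List Char) (c' : Int),
      r.foldl (fun (st : Int × List Char) bit =>
          ((if bit = '1' then st.1 else 0),
           (if PySem.Int.mod ((if bit = '1' then (1 : Int) else 0) + st.1) 2 = 1 then '1' else '0') :: st.2))
        (c, acc)
      = (c', m.reverse ++ acc) ∧ pvIsBin m ∧ m.length = r.length ∧ (c' = 0 ∨ c' = 1) ∧
        pvValL m + 2 ^ r.length * c'.toNat = pvValL r + c.toNat := by
  induction r with
  | nil =>
    intro acc c _ hc
    exact ⟨[], c, by simp, fun x hx => by simp at hx, rfl, hc, by simp [pvValL]⟩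
  | cons ch r ih =>
    intro acc c hbin hc
    have hch := hbin ch (by simp)
    have hr : pvIsBin r := fun x hx => hbin x (by simp [hx])
    simp only [List.foldl_cons]
    set c1 : Int := if ch = '1' then c else 0 with hc1
    have hc1' : c1 = 0 ∨ c1 = 1 := by rcases hc with h | h <;> rcases hch with h2 | h2 <;> simp [hc1, h, h2]
    set b0 : Char := if PySem.Int.mod ((if ch = '1' then (1 : Int) else 0) + c) 2 = 1 then '1' else '0' with hb0
    obtain ⟨m, c', heq, hmb, hml, hc', hval⟩ := ih (b0 :: acc) c1 hr hc1'
    refine ⟨b0 :: m, c', ?_, ?_, by simp [hml], hc', ?_⟩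
    · rw [heq]; simp
    · intro x hx
      rcases List.mem_cons.mp hx with h | h
      · subst h
        rw [hb0]
        by_cases hp : PySem.Int.mod ((if ch = '1' then (1 : Int) else 0) + c) 2 = 1
        · rw [if_pos hp]; exact Or.inr rfl
        · rw [if_neg hp]; exact Or.inl rfl
      · exact hmb x h
    · have hkey : pvBitN b0 + 2 * c1.toNat = pvBitN ch + c.toNat := by
        rcases hc with h | h <;> rcases hch with h2 | h2 <;>
          simp [hb0, hc1, h, h2, pvBitN, PySem.Int.mod]
      have h2 : 2 ^ r.length * 2 * c'.toNat = 2 * (2 ^ r.length * c'.toNat) := by ring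
      simp only [pvValL, List.length_cons, pow_succ]
      omega

theorem pv_padA_eq (v : Int) (hv : 0 ≤ v) :
    jtypePadA v = List.replicate (21 - (Nat.toDigits 2 v.toNat).length) '0' ++ Nat.toDigits 2 v.toNat := by
  unfold jtypePadA
  have hnb : PySem.Int.toBinChars0b v = '0' :: 'b' :: Nat.toDigits 2 v.toNat := by
    simp [PySem.Int.toBinChars0b, not_lt.mpr hv]
  rw [hnb]
  simp only [List.drop_succ_cons, List.drop_zero]
  rw [PySem.List.foldl_append_singleton_eq_map (fun _ => '0')]
  simp only [List.nil_append]
  congr 1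
  rw [List.map_const']
  congr 1
  rw [PySem.List.length_pyRange_one]
  omega

theorem pv_zfill_eq (u w : Nat) (hlen : (Nat.toDigits 2 u).length ≤ w) :
    PySem.Chars.zfill (Nat.toDigits 2 u) (w : Int) =
      List.replicate (w - (Nat.toDigits 2 u).length) '0' ++ Nat.toDigits 2 u := by
  rcases hcs : Nat.toDigits 2 u with _ | ⟨c, rest⟩
  · exfalso
    have h0 := pv_toDigits_eq u
    rw [hcs] at h0
    split at h0
    · simp at h0
    · have h1 := pv_valL_pvBitsL u
      have h2 : pvBitsL u = [] := by
        have := congrArg List.reverse h0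
        simpa using this.symm
      rw [h2] at h1
      simp [pvValL] at h1
      omega
  · have hc01 : c = '0' ∨ c = '1' := by
      have := pv_td_isBin u
      rw [hcs] at this
      exact this c (by simp)
    rw [PySem.Chars.zfill]
    rw [hcs] at hlen
    by_cases hle : (w : Int) ≤ ((c :: rest).length : Int)
    · have hle' : w ≤ (c :: rest).length := by exact_mod_cast hle
      have hlw : (c :: rest).length = w := le_antisymm hlen hle'
      rw [if_pos hle, hlw]
      simp
    · rw [if_neg hle]
      have hns : ¬ (c = '+' ∨ c = '-') := by
        rcases hc01 with h | h <;> subst h <;> decide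
      simp only [hns, if_false, Int.toNat_natCast]

theorem pv_imm_eq (off : Int) : jtypeImmA off = jtypeImmB off := by
  have hblif : PySem.Int.bitLength (if off < 0 then -off else off) = PySem.Int.bitLength off := by
    split
    · exact PySem.Int.bitLength_neg off
    · rfl
  set bl := PySem.Int.bitLength off with hbl
  set w : Nat := max 21 bl with hw
  have hM : (0 : Int) < 2 ^ w := by positivity
  have habs : off.natAbs < 2 ^ w := by
    calc off.natAbs < 2 ^ bl := PySem.Int.lt_two_pow_bitLength off
    _ ≤ 2 ^ w := Nat.pow_le_pow_right (by norm_num) (le_max_right _ _)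
  have hImmB : jtypeImmB off =
      PySem.Chars.zfill ((PySem.Int.toBinChars0b (PySem.Int.mod off ((2 : Int) ^ w))).drop 2) (w : Int) := by
    unfold jtypeImmB
    rw [hblif]
  by_cases hpos : off ≥ 0
  -- positive branch: both sides are the binary of off zero-padded to width w
  · have hmod : PySem.Int.mod off ((2 : Int) ^ w) = off := by
      rw [PySem.Int.mod_eq_emod_of_pos hM]
      apply Int.emod_eq_of_lt hpos
      have h1 : off = (off.natAbs : Int) := by omega
      rw [h1]
      exact_mod_cast habs
    set u := off.toNat with hu
    have hcast : ((u : Int)) = off := by omega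
    have hdrop : (PySem.Int.toBinChars0b off).drop 2 = Nat.toDigits 2 u := by
      simp only [PySem.Int.toBinChars0b, not_lt.mpr hpos, if_false, List.drop_succ_cons,
        List.drop_zero]
      rw [hu]
    set t := Nat.toDigits 2 u with ht
    have hLlen : t.length = if u = 0 then 1 else PySem.Int.bitLength (u : Int) := pv_td_len u
    rw [hcast] at hLlen
    have hbl0 : u = 0 → bl = 0 := by
      intro h0
      have hoff0 : off = 0 := by omega
      rw [hbl, hoff0]
      exact PySem.Int.bitLength_zero
    have hLw : t.length ≤ w := by
      split at hLlen
      · omega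
      · rw [← hbl] at hLlen; omega
    have hA : jtypeImmA off = List.replicate (21 - t.length) '0' ++ t := by
      unfold jtypeImmA
      rw [if_pos hpos, pv_padA_eq off hpos]
    have hB : jtypeImmB off = List.replicate (w - t.length) '0' ++ t := by
      rw [hImmB, hmod, hdrop]
      exact pv_zfill_eq u w hLw
    rw [hA, hB]
    have h21 : 21 - t.length = w - t.length := by
      split at hLlen
      · have := hbl0 ‹u = 0›; omega
      · rw [← hbl] at hLlen; omega
    rw [h21]
  -- negative branch: A's invert-and-add-one equals B's off mod 2^w, via value/length/injectivity
  · replace hpos : off < 0 := lt_of_not_ge hpos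
    set v := off.natAbs with hv
    have hv1 : 1 ≤ v := by omega
    have hvcast : |off| = (v : Int) := by rw [abs_of_neg hpos]; omega
    set t := Nat.toDigits 2 v with ht
    have hblv : PySem.Int.bitLength ((v : Int)) = bl := by
      rw [hbl, hv]
      rw [show ((off.natAbs : Int)) = -off by omega, PySem.Int.bitLength_neg]
    have hLlen : t.length = bl := by
      have h0 := pv_td_len v
      rw [hblv] at h0
      rw [ht]
      simpa [show v ≠ 0 by omega] using h0
    -- A side: the padded binary of |off|
    have hpadA0 := pv_padA_eq |off| (abs_nonneg off)
    rw [show (|off|).toNat = v by rw [abs_of_neg hpos]; omega] at hpadA0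
    set pad := List.replicate (21 - t.length) '0' ++ t with hpad
    have hpadA : jtypePadA |off| = pad := by rw [hpad]; exact hpadA0
    have hpadBin : pvIsBin pad := by
      intro x hx
      rcases List.mem_append.mp hx with h | h
      · left; exact List.eq_of_mem_replicate h
      · exact pv_td_isBin v x h
    have hpadLen : pad.length = w := by
      rw [hpad]
      simp only [List.length_append, List.length_replicate]
      omega
    have hpadVal : pvValL pad.reverse = v := by
      rw [hpad, List.reverse_append, List.reverse_replicate, pv_valL_append, pv_valL_zeros, pv_td_val]
      simp
    have hpadRevBin : pvIsBin pad.reverse := fun x hx => hpadBin x (List.mem_reverse.mp hx)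
    -- the inverted string
    set inv := pad.map (fun bit => if bit = '0' then '1' else '0') with hinv
    have hinvrev : inv.reverse = pad.reverse.map (fun bit => if bit = '0' then '1' else '0') := by
      rw [hinv, List.map_reverse]
    have hinvRevBin : pvIsBin inv.reverse := by
      rw [hinvrev]
      intro x hx
      obtain ⟨y, _, rfl⟩ := List.mem_map.mp hx
      split
      · right; rfl
      · left; rfl
    have hflip := pv_valL_flip pad.reverse hpadRevBin
    rw [← hinvrev] at hflip
    have hinvLen : inv.reverse.length = w := by
      rw [List.length_reverse, hinv, List.length_map, hpadLen]
    rw [List.length_reverse] at hflip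
    rw [hpadVal, hpadLen] at hflip
    -- run the carry loop
    obtain ⟨m, c', heq, hmb, hml, hc', hval⟩ := pv_carry inv.reverse [] 1 hinvRevBin (Or.inr rfl)
    rw [hinvLen] at hml hval
    have hvlt : v < 2 ^ w := habs
    have hmlt : pvValL m < 2 ^ w := by
      have := pv_valL_lt m hmb
      rw [hml] at this
      exact this
    have hcases : c'.toNat = 0 ∨ c'.toNat = 1 := by rcases hc' with h | h <;> simp [h]
    have hmval : pvValL m = 2 ^ w - v := by
      rcases hcases with h0 | h0 <;> rw [h0] at hval <;> omega
    have hA : jtypeImmA off = m.reverse := by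
      unfold jtypeImmA
      rw [if_neg (by omega : ¬ off ≥ 0)]
      show ((((jtypePadA |off|).map (fun bit => if bit = '0' then '1' else '0')).reverse.foldl
        (fun (st : Int × List Char) bit =>
          ((if bit = '1' then st.1 else 0),
           (if PySem.Int.mod ((if bit = '1' then (1 : Int) else 0) + st.1) 2 = 1 then '1' else '0') :: st.2))
        ((1 : Int), ([] : List Char))).2 = m.reverse)
      rw [hpadA, ← hinv, heq]
      simp
    -- B side
    have hmod : PySem.Int.mod off ((2 : Int) ^ w) = (2 : Int) ^ w - (v : Int) := by
      rw [PySem.Int.mod_eq_emod_of_pos hM]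
      have h1 : off = -(v : Int) := by omega
      rw [h1, show (-(v : Int)) = ((2 : Int) ^ w - (v : Int)) + 2 ^ w * (-1) by ring,
        Int.add_mul_emod_self_left]
      apply Int.emod_eq_of_lt
      · have : ((v : Int)) < (2 : Int) ^ w := by exact_mod_cast hvlt
        omega
      · have : (1 : Int) ≤ (v : Int) := by exact_mod_cast hv1
        omega
    set u2 := ((2 : Int) ^ w - (v : Int)).toNat with hu2
    have hu2n : u2 = 2 ^ w - v := by
      rw [hu2]
      have : ((2 : Int) ^ w) = ((2 ^ w : Nat) : Int) := by push_cast; ring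
      omega
    have hu2pos : 1 ≤ u2 := by omega
    have hu2lt : u2 < 2 ^ w := by omega
    have hdrop : (PySem.Int.toBinChars0b (PySem.Int.mod off ((2 : Int) ^ w))).drop 2 = Nat.toDigits 2 u2 := by
      rw [hmod]
      have hnn : ¬ ((2 : Int) ^ w - (v : Int) < 0) := by
        have : ((v : Int)) < (2 : Int) ^ w := by exact_mod_cast hvlt
        omega
      simp [PySem.Int.toBinChars0b, hnn, hu2]
    set s := Nat.toDigits 2 u2 with hs
    have hsLen : s.length ≤ w := by
      have h0 := pv_td_len u2
      rw [hs, h0]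
      have := pv_bl_le u2 w hu2lt
      split <;> omega
    have hB : jtypeImmB off = List.replicate (w - s.length) '0' ++ s := by
      rw [hImmB, hdrop]
      exact pv_zfill_eq u2 w hsLen
    have hBbin : pvIsBin (List.replicate (w - s.length) '0' ++ s) := by
      intro x hx
      rcases List.mem_append.mp hx with h | h
      · left; exact List.eq_of_mem_replicate h
      · exact pv_td_isBin u2 x h
    have hBlen : (List.replicate (w - s.length) '0' ++ s).length = w := by
      simp only [List.length_append, List.length_replicate]
      omega
    have hBval : pvValL (List.replicate (w - s.length) '0' ++ s).reverse = u2 := by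
      rw [List.reverse_append, List.reverse_replicate, pv_valL_append, pv_valL_zeros, pv_td_val]
      simp
    -- conclude by injectivity on the reversed (LSB-first) strings
    have hmBin : pvIsBin m := hmb
    have hfin : m = (List.replicate (w - s.length) '0' ++ s).reverse := by
      apply pv_valL_inj
      · exact hmBin
      · intro x hx
        exact hBbin x (List.mem_reverse.mp hx)
      · rw [List.length_reverse, hBlen, hml]
      · rw [hBval, hmval, hu2n]
    rw [hA, hB, hfin, List.reverse_reverse]

theorem pv_body_eq (r1 : String) (off : Int) :
    jtypeBodyA r1 "1101111" off = jtypeOutB r1 (jtypeImmB off) := by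
  unfold jtypeBodyA jtypeOutB
  rw [pv_imm_eq]

-- ===== VERDICT (by name: the statement is the Claim_ definition above) =====
theorem jtype_spec : Claim_equal_jtype := by
  intro r1 lis list1 d pc _ _
  unfold Spec_jtype
  cases hlast : PySem.List.pyGet? list1 (-1) with
  | none => simp only [jtype, jtype_alt, hlast]
  | some last =>
    cases hint : PySem.Int.ofStr? last with
    | some off =>
      simp only [jtype, jtype_alt, hlast, hint]
      by_cases hb : off < -524288 ∨ off > 524287
      · rw [if_pos hb, if_pos hb]
      · rw [if_neg hb, if_neg hb]
        exact pv_body_eq r1 off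
    | none =>
      cases hd : (PySem.Dict.mk d).get? last with
      | none => simp only [jtype, jtype_alt, hlast, hint, hd]
      | some v =>
        simp only [jtype, jtype_alt, hlast, hint, hd]
        exact pv_body_eq r1 (pc - v)
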